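-- pv_equiv track=rewrite | github.com/yaakitori/leverageshap_test | leverageshap/utils.py | ith_combination
-- ===== SOURCE A (Python) =====
-- import math
--
-- def ith_combination(pool, r, index):
--     # Function written by ChatGPT
--     """
--     Compute the index-th combination (0-based) in lexicographic order
--     without generating all previous combinations.
--     """
--     n = len(pool)
--     combination = []
--     elements_left = n
--     k = r
--     start = 0
--
--     for i in range(r):
--         # Find the largest value for the first element in the combination
--         # that allows completing the remaining k-1 elements
--         for j in range(start, elements_left):
--             count = math.comb(elements_left - j - 1, k - 1)
--             if index < count:
--                 combination.append(pool[j])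
--                 k -= 1
--                 start = j + 1
--                 break
--             index -= count
--
--     return tuple(combination)
-- ===== SOURCE B (Python) =====
-- import math
--
-- def ith_combination(pool, r, index):
--     """
--     index-th r-combination of pool in lexicographic order, via the
--     combinatorial number system: the complement rank m = C(n,r)-1-index is
--     decomposed greedily as m = C(c_r, r) + C(c_{r-1}, r-1) + ... with
--     c_r > c_{r-1} > ..., and each digit c_k selects the element at position
--     n-1-c_k.
--     """
--     if r <= 0:
--         # only the empty combination; the digit decomposition below needs r >= 1
--         return ()
--     n = len(pool)
--     m = math.comb(n, r) - 1 - index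
--     out = []
--     c = n - 1
--     for k in range(r, 0, -1):
--         q = math.comb(c, k)
--         while q > m:
--             c -= 1
--             q = math.comb(c, k)
--         out.append(pool[n - 1 - c])
--         m -= q
--         c -= 1
--     return tuple(out)
-- ===== Notes on version B (the rewrite author's own statement) =====
-- stated objective: alternative
-- what changed: B unranks through the combinatorial number system: it converts index once into the complement rank m = C(n,r)-1-index and greedily extracts the combinadic digits c_r > c_{r-1} > ... by a descending scan comparing single binomials C(c,k) against m, instead of A's forward scan that subtracts a per-position count from index; Pre_ excludes out-of-range requests (r > len(pool) or index >= C(n,r), with r >= 1), on which A silently returns an accidentally short tuple from leftover loop state while B's math.comb is handed a negative argument and raises ValueError.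
-- outside the precondition, e.g. on ith_combination([1, 2, 3], 2, 5): A returns (2,), B raises ValueError; on ith_combination([1, 2], 3, 0): A returns (), B raises ValueError
import Mathlib
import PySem

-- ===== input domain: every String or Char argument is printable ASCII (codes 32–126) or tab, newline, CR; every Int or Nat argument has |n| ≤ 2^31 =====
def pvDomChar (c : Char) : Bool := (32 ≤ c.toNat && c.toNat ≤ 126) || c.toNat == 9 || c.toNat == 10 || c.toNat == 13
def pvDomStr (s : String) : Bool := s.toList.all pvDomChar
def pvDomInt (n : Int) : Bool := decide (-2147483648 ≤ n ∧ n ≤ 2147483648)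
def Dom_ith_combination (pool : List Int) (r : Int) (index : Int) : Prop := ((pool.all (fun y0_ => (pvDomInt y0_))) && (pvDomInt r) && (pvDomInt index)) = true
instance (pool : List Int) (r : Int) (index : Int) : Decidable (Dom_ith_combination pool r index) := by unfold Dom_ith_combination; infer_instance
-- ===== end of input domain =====

-- B unranks via the combinatorial number system: the complement rank C(n,r)-1-index
-- is decomposed into combinadic digits by a descending scan (objective: alternative).

-- math.comb a b for nonnegative a, b; both ports only ever call it with
-- nonnegative arguments, so the case where Python raises is unreachable.
def mathComb (a b : Int) : Int :=
  if 0 ≤ a ∧ 0 ≤ b then (Nat.choose a.toNat b.toNat : Int) else 0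

-- ===== PORT A =====
-- inner loop `for j in range(start, elements_left): … break` of A
def ithA_scan (n k : Int) (j index : Int) : Option Int × Int :=
  if _h : j < n then
    let count := mathComb (n - j - 1) (k - 1)
    if index < count then (some j, index)
    else ithA_scan n k (j + 1) (index - count)
  else (none, index)
termination_by (n - j).toNat
decreasing_by omega

-- outer loop `for i in range(r)` of A over state (combination, index, k, start)
def ithA_loop (pool : List Int) (n : Int) : Nat → List Int → Int → Int → Int → List Int
  | 0, comb, _, _, _ => comb
  | m + 1, comb, index, k, start =>
    match ithA_scan n k start index with
    | (some j, index') =>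
        ithA_loop pool n m (comb ++ [(PySem.List.pyGet? pool j).getD 0]) index' (k - 1) (j + 1)
    | (none, index') => ithA_loop pool n m comb index' k start

def ith_combination (pool : List Int) (r : Int) (index : Int) : List Int :=
  ithA_loop pool (pool.length : Int) r.toNat [] index r 0

-- ===== PORT B =====
-- `while q > m: c -= 1; q = math.comb(c, k)` of B: descending scan for the next
-- combinadic digit.  Python's math.comb raises ValueError once c goes negative
-- (only outside Pre_); the port stops there instead, which Pre_ makes unreachable.
def ithB_down (k m c : Int) : Int :=
  if _h : 0 ≤ c ∧ m < mathComb c k then ithB_down k m (c - 1) else c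
termination_by (c + 1).toNat
decreasing_by omega

-- `for k in range(r, 0, -1): …` of B over state (out, m, c); k = fuel
def ithB_loop (pool : List Int) (n : Int) : Nat → List Int → Int → Int → List Int
  | 0, out, _, _ => out
  | j + 1, out, m, c =>
    ithB_loop pool n j
      (out ++ [(PySem.List.pyGet? pool
        (n - 1 - ithB_down ((j + 1 : Nat) : Int) m c)).getD 0])
      (m - mathComb (ithB_down ((j + 1 : Nat) : Int) m c) ((j + 1 : Nat) : Int))
      (ithB_down ((j + 1 : Nat) : Int) m c - 1)

def ith_combination_alt (pool : List Int) (r : Int) (index : Int) : List Int :=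
  if r ≤ 0 then []
  else ithB_loop pool (pool.length : Int) r.toNat []
    (mathComb (pool.length : Int) r - 1 - index) ((pool.length : Int) - 1)

-- ===== PRECONDITION & SPEC =====
-- Pre_ excludes exactly the out-of-range requests (r > len(pool), or
-- index ≥ C(n,r), with r ≥ 1), on which A silently returns an accidentally short
-- tuple from leftover loop state while B's math.comb is handed a negative
-- argument and raises ValueError.
def Pre_ith_combination (pool : List Int) (r : Int) (index : Int) : Prop :=
  r ≤ 0 ∨ (r ≤ (pool.length : Int) ∧ index < mathComb (pool.length : Int) r)
instance (pool : List Int) (r : Int) (index : Int) : Decidable (Pre_ith_combination pool r index) := by unfold Pre_ith_combination; infer_instance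

def pvWitness_ith_combination : List Int × Int × Int := ([3, 1, 4, 1, 5], 3, 7)

def Spec_ith_combination (pool : List Int) (r : Int) (index : Int) (out : List Int) : Prop := out = ith_combination_alt pool r index
instance (pool : List Int) (r : Int) (index : Int) (out : List Int) : Decidable (Spec_ith_combination pool r index out) := by unfold Spec_ith_combination; infer_instance

-- ===== CLAIM (what is proved, stated in full; the proofs are below) =====
def Claim_equal_ith_combination : Prop := ∀ (pool : List Int) (r : Int) (index : Int), Dom_ith_combination pool r index → Pre_ith_combination pool r index → Spec_ith_combination pool r index (ith_combination pool r index)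

-- ===== LEMMAS AND PROOFS =====

theorem comb_lt (a b : Int) (ha : 0 ≤ a) (hab : a < b) : mathComb a b = 0 := by
  unfold mathComb
  rw [if_pos ⟨ha, by omega⟩, Nat.choose_eq_zero_of_lt (by omega)]
  norm_num

-- Pascal: C(a+1, k) = C(a, k) + C(a, k-1)
theorem comb_pascal (a k : Int) (ha : 0 ≤ a) (hk : 1 ≤ k) :
    mathComb (a + 1) k = mathComb a k + mathComb a (k - 1) := by
  unfold mathComb
  rw [if_pos ⟨by omega, by omega⟩, if_pos ⟨ha, by omega⟩, if_pos ⟨ha, by omega⟩]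
  have h1 : (a + 1).toNat = a.toNat + 1 := by omega
  have h2 : k.toNat = (k - 1).toNat + 1 := by omega
  rw [h1, h2, Nat.choose_succ_succ']
  push_cast; ring

theorem comb_mono (a b k : Int) (ha : 0 ≤ a) (hab : a ≤ b) :
    mathComb a k ≤ mathComb b k := by
  unfold mathComb
  by_cases hk : 0 ≤ k
  · rw [if_pos ⟨ha, hk⟩, if_pos ⟨by omega, hk⟩]
    exact_mod_cast Nat.choose_le_choose _ (by omega : a.toNat ≤ b.toNat)
  · rw [if_neg (by omega), if_neg (by omega)]

-- cumulative count T(j) = Σ_{t=start}^{j} C(n-t-1, k-1), in closed form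
def Tf (n k start j : Int) : Int := mathComb (n - start) k - mathComb (n - j - 1) k

theorem Tf_start (n k start : Int) : Tf n k start (start - 1) = 0 := by
  unfold Tf; ring_nf

theorem Tf_step (n k start j : Int) (hj : j < n) (hk : 1 ≤ k) :
    Tf n k start j = Tf n k start (j - 1) + mathComb (n - j - 1) (k - 1) := by
  unfold Tf
  have h : n - (j - 1) - 1 = (n - j - 1) + 1 := by ring
  rw [h, comb_pascal (n - j - 1) k (by omega) hk]
  ring

theorem Tf_mono (n k start j j' : Int) (hj : j ≤ j') (hj' : j' ≤ n - 1) :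
    Tf n k start j ≤ Tf n k start j' := by
  unfold Tf
  have := comb_mono (n - j' - 1) (n - j - 1) k (by omega) (by omega)
  omega

-- least j' ≥ j with index < T(j'), else n (proof-only helper)
def lmin (n k start index : Int) (j : Int) : Int :=
  if _h : j < n then
    if index < Tf n k start j then j else lmin n k start index (j + 1)
  else n
termination_by (n - j).toNat
decreasing_by omega

theorem lmin_ge (n k start index j : Int) (hjn : j ≤ n) : j ≤ lmin n k start index j := by
  rw [lmin]
  by_cases hj : j < n
  · simp only [dif_pos hj]
    by_cases hp : index < Tf n k start j
    · simp [hp]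
    · simp only [if_neg hp]
      have := lmin_ge n k start index (j + 1) (by omega); omega
  · simp only [dif_neg hj]; omega
termination_by (n - j).toNat
decreasing_by omega

theorem lmin_skip (n k start index j : Int) (hj : j < n)
    (hnp : ¬ index < Tf n k start j) :
    lmin n k start index j = lmin n k start index (j + 1) := by
  rw [lmin]; simp [hj, hnp]

theorem lmin_le_of_pred (n k start index j t : Int) (hjt : j ≤ t) (ht : t < n)
    (hp : index < Tf n k start t) : lmin n k start index j ≤ t := by
  by_cases hj : j < n
  · by_cases hq : index < Tf n k start j
    · rw [lmin]; simp [hj, hq]; omega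
    · rw [lmin_skip n k start index j hj hq]
      rcases eq_or_lt_of_le hjt with h | h
      · exact absurd (h ▸ hp) hq
      · exact lmin_le_of_pred n k start index (j + 1) t (by omega) ht hp
  · omega
termination_by (n - j).toNat
decreasing_by omega

theorem lmin_pred (n k start index j : Int) (h : lmin n k start index j < n) :
    index < Tf n k start (lmin n k start index j) := by
  by_cases hj : j < n
  · by_cases hp : index < Tf n k start j
    · have he : lmin n k start index j = j := by rw [lmin]; simp [hj, hp]
      rw [he]; exact hp
    · rw [lmin_skip n k start index j hj hp] at h ⊢
      exact lmin_pred n k start index (j + 1) h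
  · rw [lmin] at h; simp [hj] at h
termination_by (n - j).toNat
decreasing_by omega

-- A's inner scan, started at (j, index - T(j-1)), described via lmin
theorem scan_spec (n k start index : Int) (j : Int)
    (hs : start ≤ j) (hj : j ≤ n) (hk : 1 ≤ k) :
    ithA_scan n k j (index - Tf n k start (j - 1)) =
      (if lmin n k start index j < n
        then (some (lmin n k start index j),
              index - Tf n k start (lmin n k start index j - 1))
        else (none, index - Tf n k start (n - 1))) := by
  rw [ithA_scan]
  by_cases hjn : j < n
  · simp only [dif_pos hjn]
    have hstep := Tf_step n k start j hjn hk
    by_cases hp : index < Tf n k start j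
    · have hc : index - Tf n k start (j - 1) < mathComb (n - j - 1) (k - 1) := by omega
      have hl : lmin n k start index j = j := by rw [lmin]; simp [hjn, hp]
      rw [if_pos hc, hl, if_pos hjn]
    · have hc : ¬ index - Tf n k start (j - 1) < mathComb (n - j - 1) (k - 1) := by omega
      have harg : index - Tf n k start (j - 1) - mathComb (n - j - 1) (k - 1) =
          index - Tf n k start (j + 1 - 1) := by
        have h1 : j + 1 - 1 = j := by ring
        rw [h1]; omega
      rw [if_neg hc, harg, scan_spec n k start index (j + 1) (by omega) (by omega) hk,
        lmin_skip n k start index j hjn hp]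
  · have hl : lmin n k start index j = n := by rw [lmin]; simp [hjn]
    have hje : j = n := by omega
    rw [dif_neg hjn, hl, if_neg (lt_irrefl n), hje]
termination_by (n - j).toNat
decreasing_by omega

-- the comparison `C(c, k) ≤ m` made by B's descending scan is exactly
-- `lmin ≤ n - 1 - c` on the probed range (m being the complement rank)
theorem probe_iff (n k start index p : Int)
    (hs : start ≤ p) (hp : p < n)
    (hL : lmin n k start index start < n) :
    (index < mathComb (n - start) k - mathComb (n - p - 1) k ↔
      lmin n k start index start ≤ p) := by
  constructor
  · intro h
    exact lmin_le_of_pred n k start index start p hs hp h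
  · intro h
    have h1 := lmin_pred n k start index start hL
    have h2 := Tf_mono n k start (lmin n k start index start) p h (by omega)
    unfold Tf at h1 h2
    omega

-- B's descending scan finds the digit c = n - 1 - lmin
theorem down_spec (n k start index c : Int)
    (hL : lmin n k start index start < n)
    (hLge : start ≤ lmin n k start index start)
    (hc1 : n - 1 - lmin n k start index start ≤ c) (hc2 : c ≤ n - start - 1) :
    ithB_down k (mathComb (n - start) k - 1 - index) c =
      n - 1 - lmin n k start index start := by
  rw [ithB_down]
  have hp := probe_iff n k start index (n - 1 - c) (by omega) (by omega) hL
  rw [show n - (n - 1 - c) - 1 = c by ring] at hp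
  by_cases hstop : lmin n k start index start ≤ n - 1 - c
  · have : ¬ mathComb (n - start) k - 1 - index < mathComb c k := by
      have := hp.mpr hstop; omega
    rw [dif_neg (by omega)]
    omega
  · have hcont : mathComb (n - start) k - 1 - index < mathComb c k := by
      by_contra hcc
      exact hstop (hp.mp (by omega))
    rw [dif_pos ⟨by omega, hcont⟩]
    exact down_spec n k start index (c - 1) hL hLge (by omega) (by omega)
termination_by (c + 1).toNat
decreasing_by omega

-- main loop equivalence under the invariant index < C(n-start, k), k = fuel ≤ n - start;
-- B carries the complement rank m = C(n-start, k) - 1 - index and c = n - start - 1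
theorem loop_eq (pool : List Int) (n : Int) (m : Nat) (acc : List Int)
    (index start : Int) (hs : 0 ≤ start) (hkn : (m : Int) ≤ n - start)
    (hidx : index < mathComb (n - start) (m : Int)) :
    ithA_loop pool n m acc index (m : Int) start =
      ithB_loop pool n m acc (mathComb (n - start) (m : Int) - 1 - index)
        (n - start - 1) := by
  induction m generalizing acc index start with
  | zero => rfl
  | succ m ih =>
    have hk : (1 : Int) ≤ ((m + 1 : Nat) : Int) := by push_cast; omega
    set k : Int := ((m + 1 : Nat) : Int) with hkdef
    -- L is reached: Tf at n - k already counts everything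
    have hnk : Tf n k start (n - k) = mathComb (n - start) k := by
      unfold Tf
      rw [show n - (n - k) - 1 = k - 1 by ring, comb_lt (k - 1) k (by omega) (by omega)]
      ring
    set L := lmin n k start index start with hLdef
    have hLle : L ≤ n - k :=
      lmin_le_of_pred n k start index start (n - k) (by omega) (by omega)
        (by rw [hnk]; exact hidx)
    have hLn : L < n := by omega
    have hLge : start ≤ L := lmin_ge n k start index start (by omega)
    have hpredL := lmin_pred n k start index start hLn
    rw [← hLdef] at hpredL
    -- A's round
    have hscan := scan_spec n k start index start le_rfl (by omega) hk
    rw [Tf_start, sub_zero, ← hLdef] at hscan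
    -- B's round
    have hdown := down_spec n k start index (n - start - 1) hLn hLge (by omega) le_rfl
    rw [← hLdef] at hdown
    have hTeq : Tf n k start (L - 1) = mathComb (n - start) k - mathComb (n - L) k := by
      unfold Tf; rw [show n - (L - 1) - 1 = n - L by ring]
    have hpas : mathComb (n - L) k = mathComb (n - L - 1) k + mathComb (n - L - 1) (k - 1) := by
      have h := comb_pascal (n - L - 1) k (by omega) (by omega)
      rw [show n - L - 1 + 1 = n - L by ring] at h
      exact h
    have hstep := Tf_step n k start L hLn hk
    have hk1 : k - 1 = ((m : Nat) : Int) := by rw [hkdef]; push_cast; ring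
    show ithA_loop pool n (m + 1) acc index k start =
      ithB_loop pool n (m + 1) acc (mathComb (n - start) k - 1 - index) (n - start - 1)
    rw [ithA_loop, hscan, if_pos hLn, ithB_loop]
    rw [show ((m + 1 : Nat) : Int) = k from rfl, hdown,
      show n - 1 - (n - 1 - L) = L by ring]
    have hmeq : mathComb (n - start) k - 1 - index - mathComb (n - 1 - L) k =
        mathComb (n - (L + 1)) (k - 1) - 1 - (index - Tf n k start (L - 1)) := by
      rw [show n - 1 - L = n - L - 1 by ring, show n - (L + 1) = n - L - 1 by ring]
      omega
    have hceq : n - 1 - L - 1 = n - (L + 1) - 1 := by ring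
    rw [hmeq, hceq, hk1]
    exact ih (acc ++ [(PySem.List.pyGet? pool L).getD 0])
      (index - Tf n k start (L - 1)) (L + 1) (by omega) (by omega)
      (by rw [show n - (L + 1) = n - L - 1 by ring, ← hk1]; omega)

-- ===== VERDICT (by name: the statement is the Claim_ definition above) =====
theorem ith_combination_spec : Claim_equal_ith_combination := by
  intro pool r index _ hpre
  unfold Spec_ith_combination ith_combination ith_combination_alt
  rcases hpre with h0 | ⟨hrn, hidx⟩
  · rw [if_pos h0, show r.toNat = 0 by omega]; rfl
  · by_cases hr0 : r ≤ 0
    · rw [if_pos hr0, show r.toNat = 0 by omega]; rfl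
    rw [if_neg hr0]
    have hc : r = ((r.toNat : Nat) : Int) := by omega
    have := loop_eq pool (pool.length : Int) r.toNat [] index 0 le_rfl (by omega)
      (by rw [sub_zero, ← hc]; exact hidx)
    rw [sub_zero, ← hc] at this
    exact this
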